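-- pv_equiv track=rewrite | github.com/tautobot/mktg-bot | aqa/utils/helper.py | remove_all_redundant_lines_from_str
-- ===== SOURCE A (Python) =====
-- def find_characters_before_comma_at(line, comma_at):
--     comma_indices = [pos for pos, char in enumerate(line) if char == ',']
--     if 0 < comma_at <= len(comma_indices):
--         index = comma_indices[comma_at - 1]
--         return line[:index]
--
--     return None
--
-- def remove_all_redundant_lines_from_str(text, str_to_find='(GMT+7)'):
--     lines = text.split('\n')
--     index_to_remove = -1
--
--     for i, line in enumerate(lines):
--         if str_to_find in line:
--             index_to_remove = i
--             break
--
--     if index_to_remove != -1: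
--         lines = lines[index_to_remove:]
--         lines[0] = find_characters_before_comma_at(lines[0], 2)
--
--     result = '\n'.join(lines)
--     return result
-- ===== SOURCE B (Python) =====
-- def _before_second_comma(line):
--     i = line.find(',')
--     if i == -1:
--         return None
--     j = line.find(',', i + 1)
--     if j == -1:
--         return None
--     return line[:j]
--
-- def remove_all_redundant_lines_from_str(text, str_to_find='(GMT+7)'):
--     start = 0
--     while True:
--         nl = text.find('\n', start)
--         end = len(text) if nl == -1 else nl
--         head = text[start:end]
--         if str_to_find in head:
--             return _before_second_comma(head) + text[end:]
--         if nl == -1: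
--             return text
--         start = nl + 1
-- ===== Notes on version B (the rewrite author's own statement) =====
-- stated objective: alternative
-- what changed: B replaces A's split-into-a-list-of-lines / enumerate-scan / slice / mutate / join pipeline with a single index-based scan over the string itself (find the next newline, test that line for the marker, reconstruct the result by string slicing), and truncates at the second comma via two find calls instead of enumerating all comma positions.
-- outside the precondition, e.g. on remove_all_redundant_lines_from_str('(GMT+7) no commas', '(GMT+7)'): A raises TypeError, B raises TypeError
import Mathlib
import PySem

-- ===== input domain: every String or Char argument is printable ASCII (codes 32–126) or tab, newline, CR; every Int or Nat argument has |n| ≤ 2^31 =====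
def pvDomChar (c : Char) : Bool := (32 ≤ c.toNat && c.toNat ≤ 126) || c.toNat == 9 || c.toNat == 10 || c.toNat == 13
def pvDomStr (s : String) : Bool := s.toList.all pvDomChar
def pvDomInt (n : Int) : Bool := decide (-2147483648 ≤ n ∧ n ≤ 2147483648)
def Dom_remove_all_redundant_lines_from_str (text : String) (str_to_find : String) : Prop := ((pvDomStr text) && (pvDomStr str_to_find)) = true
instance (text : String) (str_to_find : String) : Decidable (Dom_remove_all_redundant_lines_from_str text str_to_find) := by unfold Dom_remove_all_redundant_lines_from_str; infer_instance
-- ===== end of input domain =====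

-- B rewrites A's split-into-list / scan / mutate / join pipeline as a single index-based scan over the
-- string itself (find the next newline, test the line, reconstruct by slicing); objective: alternative.

-- ===== PORT A =====
def pvFindCharsBeforeCommaAt (line : List Char) (comma_at : Int) : Option (List Char) :=
  let comma_indices := ((PySem.List.enumerate line 0).filter (fun p => p.2 == ',')).map Prod.fst
  if 0 < comma_at ∧ comma_at ≤ comma_indices.length then
    match PySem.List.pyGet? comma_indices (comma_at - 1) with
    | some index => some (PySem.Chars.slice line none (some index))
    | none => none  -- unreachable: the index is in range when the guard holds
  else none

def pvScanA (str_to_find : List Char) (lines : List (List Char)) (i : Int) : Int :=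
  match lines with
  | [] => -1
  | line :: rest => if PySem.Chars.isIn str_to_find line then i else pvScanA str_to_find rest (i + 1)

def remove_all_redundant_lines_from_str (text : String) (str_to_find : String) : String :=
  let lines := PySem.Chars.splitOn text.toList ['\n']
  let index_to_remove := pvScanA str_to_find.toList lines 0
  if index_to_remove ≠ -1 then
    match PySem.List.slice lines (some index_to_remove) none with
    | [] => ""  -- unreachable: the slice keeps the matched line
    | line0 :: rest =>
      match pvFindCharsBeforeCommaAt line0 2 with
      | none => ""  -- Python raises TypeError here (newline-join over a None); excluded by Pre_
      | some f => String.ofList (PySem.Chars.join ['\n'] (f :: rest))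
  else String.ofList (PySem.Chars.join ['\n'] lines)

-- ===== PORT B =====
def pvBeforeSecondComma (line : List Char) : Option (List Char) :=
  let i := PySem.Chars.find line [',']
  if i = -1 then none
  else
    let j := PySem.Chars.findFrom line [','] (i + 1)
    if j = -1 then none
    else some (PySem.Chars.slice line none (some j))

-- termination fact for the loop below (cited in decreasing_by)
theorem pvFindFrom_progress (cs sub : List Char) (start : Nat)
    (h : PySem.Chars.findFrom cs sub (start : Int) ≠ -1) :
    start ≤ cs.length ∧ (start : Int) ≤ PySem.Chars.findFrom cs sub (start : Int) := by
  unfold PySem.Chars.findFrom at *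
  simp only [] at h ⊢
  have hf := PySem.Chars.neg_one_le_find (List.drop (Int.toNat (start : Int)) (List.take (Int.toNat (cs.length : Int)) cs)) sub
  split_ifs at h ⊢ <;> omega

def pvAltLoop (text str_to_find : List Char) (start : Nat) : String :=
  let nl := PySem.Chars.findFrom text ['\n'] (start : Int)
  let en := if nl = -1 then (text.length : Int) else nl
  let head := PySem.Chars.slice text (some (start : Int)) (some en)
  if PySem.Chars.isIn str_to_find head then
    match pvBeforeSecondComma head with
    | none => ""  -- Python raises TypeError here (None + str); excluded by Pre_
    | some t => String.ofList (t ++ PySem.Chars.slice text (some en) none)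
  else if h : nl = -1 then String.ofList text
  else pvAltLoop text str_to_find (nl.toNat + 1)
termination_by text.length + 1 - start
decreasing_by
  have := pvFindFrom_progress text ['\n'] start h
  omega

def remove_all_redundant_lines_from_str_alt (text : String) (str_to_find : String) : String :=
  pvAltLoop text.toList str_to_find.toList 0

-- ===== PRECONDITION & SPEC =====
-- Pre_ excludes exactly the inputs on which Python A raises TypeError (joining lines when the
-- first kept line was replaced by None): those where some line contains the marker but the first such line has fewer
-- than two commas.
def Pre_remove_all_redundant_lines_from_str (text : String) (str_to_find : String) : Prop :=
  (((PySem.Chars.splitOn text.toList ['\n']).find?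
      (fun l => PySem.Chars.isIn str_to_find.toList l)).all
    (fun l => decide (2 ≤ PySem.Chars.count l [',']))) = true
instance (text : String) (str_to_find : String) : Decidable (Pre_remove_all_redundant_lines_from_str text str_to_find) := by unfold Pre_remove_all_redundant_lines_from_str; infer_instance

def pvWitness_remove_all_redundant_lines_from_str : String × String := ("a,b,(GMT+7) x\nkeep me", "(GMT+7)")

def Spec_remove_all_redundant_lines_from_str (text : String) (str_to_find : String) (out : String) : Prop := out = remove_all_redundant_lines_from_str_alt text str_to_find
instance (text : String) (str_to_find : String) (out : String) : Decidable (Spec_remove_all_redundant_lines_from_str text str_to_find out) := by unfold Spec_remove_all_redundant_lines_from_str; infer_instance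

-- ===== CLAIM (what is proved, stated in full; the proofs are below) =====
def Claim_equal_remove_all_redundant_lines_from_str : Prop := ∀ (text : String) (str_to_find : String), Dom_remove_all_redundant_lines_from_str text str_to_find → Pre_remove_all_redundant_lines_from_str text str_to_find → Spec_remove_all_redundant_lines_from_str text str_to_find (remove_all_redundant_lines_from_str text str_to_find)

-- ===== LEMMAS AND PROOFS =====
-- ============ lines machinery ============
def pvLinesOf : List Char → List (List Char)
  | [] => [[]]
  | c :: rest =>
    if c = '\n' then [] :: pvLinesOf rest
    else match pvLinesOf rest with
         | [] => [[c]]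
         | l :: ls => (c :: l) :: ls

theorem pvLinesOf_ne_nil (cs : List Char) : pvLinesOf cs ≠ [] := by
  cases cs with
  | nil => simp [pvLinesOf]
  | cons c rest =>
    simp only [pvLinesOf]
    split_ifs
    · simp
    · cases h : pvLinesOf rest <;> simp

theorem pvSplitOn_go_eq : ∀ (fuel : Nat) (l cur : List Char) (acc : List (List Char)),
    l.length < fuel →
    PySem.Chars.splitOn.go ['\n'] fuel l cur acc
      = acc.reverse ++ (match pvLinesOf l with
                        | [] => [cur.reverse]
                        | x :: xs => (cur.reverse ++ x) :: xs) := by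
  intro fuel
  induction fuel with
  | zero => intro l cur acc h; omega
  | succ f ih =>
    intro l cur acc h
    cases l with
    | nil => simp [PySem.Chars.splitOn.go, pvLinesOf]
    | cons c rest =>
      by_cases hc : c = '\n'
      · subst hc
        rw [PySem.Chars.splitOn.go]
        simp only [List.isPrefixOf, List.length_cons] at h ⊢
        rw [if_pos (by simp)]
        have hdrop : List.drop (([] : List Char).length + 1) ('\n' :: rest) = rest := by simp
        rw [hdrop, ih rest [] _ (by omega)]
        rcases hrest : pvLinesOf rest with _ | ⟨x, xs⟩
        · exact absurd hrest (pvLinesOf_ne_nil rest)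
        · simp [pvLinesOf, hrest]
      · rw [PySem.Chars.splitOn.go]
        rw [if_neg (by simp [List.isPrefixOf]; intro h'; exact absurd h'.symm hc)]
        rw [ih rest (c :: cur) acc (by simp at h ⊢; omega)]
        rcases hrest : pvLinesOf rest with _ | ⟨x, xs⟩
        · exact absurd hrest (pvLinesOf_ne_nil rest)
        · simp [pvLinesOf, hrest, hc]

theorem pvSplitOn_eq (cs : List Char) :
    PySem.Chars.splitOn cs ['\n'] = pvLinesOf cs := by
  unfold PySem.Chars.splitOn
  rw [pvSplitOn_go_eq (cs.length + 1) cs [] [] (by omega)]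
  rcases h : pvLinesOf cs with _ | ⟨x, xs⟩
  · exact absurd h (pvLinesOf_ne_nil cs)
  · simp

theorem pvJoin_linesOf (cs : List Char) :
    PySem.Chars.join ['\n'] (pvLinesOf cs) = cs := by
  induction cs with
  | nil => simp [pvLinesOf, PySem.Chars.join_singleton]
  | cons c rest ih =>
    by_cases hc : c = '\n'
    · subst hc
      rcases hrest : pvLinesOf rest with _ | ⟨x, xs⟩
      · exact absurd hrest (pvLinesOf_ne_nil rest)
      · rw [hrest] at ih
        rw [show pvLinesOf ('\n' :: rest) = [] :: x :: xs by simp [pvLinesOf, hrest]]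
        rw [PySem.Chars.join_cons_cons]
        simp [ih]
    · simp only [pvLinesOf, if_neg hc]
      rcases hrest : pvLinesOf rest with _ | ⟨x, xs⟩
      · exact absurd hrest (pvLinesOf_ne_nil rest)
      · rw [hrest] at ih
        cases xs with
        | nil => simpa [PySem.Chars.join_singleton] using congrArg (c :: ·) ih
        | cons y ys =>
          rw [PySem.Chars.join_cons_cons] at ih ⊢
          simpa using congrArg (c :: ·) ih

theorem pvLinesOf_no_nl {cs : List Char} (h : '\n' ∉ cs) : pvLinesOf cs = [cs] := by
  induction cs with
  | nil => rfl
  | cons c rest ih =>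
    simp only [List.mem_cons, not_or] at h
    simp [pvLinesOf, Ne.symm h.1, ih h.2]

theorem pvLinesOf_append {a : List Char} (b : List Char) (h : '\n' ∉ a) :
    pvLinesOf (a ++ '\n' :: b) = a :: pvLinesOf b := by
  induction a with
  | nil => simp [pvLinesOf]
  | cons c rest ih =>
    simp only [List.mem_cons, not_or] at h
    simp [pvLinesOf, Ne.symm h.1, ih h.2]

-- ============ single-character find ============
theorem pvFindGo_singleton (c : Char) : ∀ (l : List Char) (k : Nat),
    PySem.Chars.find.go [c] l k = if c ∈ l then ((k + l.idxOf c : Nat) : Int) else -1 := by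
  intro l
  induction l with
  | nil => intro k; simp [PySem.Chars.find.go]
  | cons a t ih =>
    intro k
    rw [PySem.Chars.find.go]
    by_cases hca : c = a
    · subst hca
      rw [if_pos (by simp [List.isPrefixOf])]
      simp [List.idxOf_cons_self]
    · rw [if_neg (by simp [List.isPrefixOf]; exact fun h' => hca h')]
      rw [ih (k + 1)]
      simp only [List.mem_cons]
      rw [List.idxOf_cons_ne _ (Ne.symm hca)]
      by_cases hm : c ∈ t
      · rw [if_pos hm, if_pos (Or.inr hm)]
        push_cast; ring
      · rw [if_neg hm, if_neg (by simp [hm, hca])]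

theorem pvFind_singleton (c : Char) (l : List Char) :
    PySem.Chars.find l [c] = if c ∈ l then (l.idxOf c : Int) else -1 := by
  unfold PySem.Chars.find
  rw [pvFindGo_singleton]
  simp
-- ============ comma positions ============
def pvCommaPos : List Char → List Int
  | [] => []
  | c :: r => if c = ',' then 0 :: (pvCommaPos r).map (· + 1) else (pvCommaPos r).map (· + 1)

theorem pvCommaIdx_eq : ∀ (l : List Char) (k : Int),
    ((PySem.List.enumerate l k).filter (fun p => p.2 == ',')).map Prod.fst
      = (pvCommaPos l).map (fun n => k + n) := by
  intro l
  induction l with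
  | nil => intro k; simp [PySem.List.enumerate_nil, pvCommaPos]
  | cons c r ih =>
    intro k
    rw [PySem.List.enumerate_cons]
    by_cases hc : c = ','
    · subst hc
      simp only [List.filter_cons, pvCommaPos]
      simp only [beq_self_eq_true, if_pos]
      simp only [List.map_cons, ih (k + 1), List.map_map]
      refine congrArg₂ _ (by omega) ?_
      refine List.map_congr_left (fun n _ => ?_)
      simp [Function.comp]; ring
    · simp only [List.filter_cons, pvCommaPos, if_neg hc]
      rw [if_neg (by simpa using hc)]
      simp only [ih (k + 1), List.map_map]
      refine List.map_congr_left (fun n _ => ?_)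
      simp [Function.comp]; ring

theorem pvCommaPos_nil_iff (l : List Char) : pvCommaPos l = [] ↔ ',' ∉ l := by
  induction l with
  | nil => simp [pvCommaPos]
  | cons c r ih =>
    by_cases hc : c = ','
    · subst hc; simp [pvCommaPos]
    · simp [pvCommaPos, hc, ih, Ne.symm hc]

theorem pvCommaPos_append (a b : List Char) (h : ',' ∉ a) :
    pvCommaPos (a ++ ',' :: b) = (a.length : Int) :: (pvCommaPos b).map (· + ((a.length : Int) + 1)) := by
  induction a with
  | nil => simp [pvCommaPos]
  | cons c r ih =>
    simp only [List.mem_cons, not_or] at h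
    simp only [List.cons_append, pvCommaPos, if_neg (fun h' => h.1 (Eq.symm h')), ih h.2]
    simp only [List.map_cons, List.map_map, List.length_cons]
    refine congrArg₂ _ (by push_cast; ring) ?_
    refine List.map_congr_left (fun n _ => ?_)
    simp [Function.comp]; ring
-- ============ helper equality ============
theorem pvHelper_eq (l : List Char) :
    pvFindCharsBeforeCommaAt l 2 = pvBeforeSecondComma l := by
  unfold pvFindCharsBeforeCommaAt pvBeforeSecondComma
  simp only [pvCommaIdx_eq l 0]
  by_cases h1 : ',' ∈ l
  · -- decompose l at the first comma
    have hp : List.idxOf ',' l < l.length := List.idxOf_lt_length_of_mem h1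
    set p := List.idxOf ',' l with hpdef
    have hdecomp : l.take p ++ ',' :: l.drop (p + 1) = l := by
      have h' := List.take_append_drop p l
      rwa [List.drop_eq_getElem_cons hp, List.getElem_idxOf hp] at h'
    have hnotin : ',' ∉ l.take p := by
      intro hmem
      have := (List.mem_take_iff_idxOf_lt h1).1 hmem
      omega
    have hlen : (l.take p).length = p := by rw [List.length_take]; omega
    have hcp : pvCommaPos l = (p : Int) :: (pvCommaPos (l.drop (p + 1))).map (· + ((p : Int) + 1)) := by
      conv_lhs => rw [← hdecomp]
      rw [pvCommaPos_append _ _ hnotin, hlen]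
    have hfind : PySem.Chars.find l [','] = (p : Int) := by
      rw [pvFind_singleton, if_pos h1]
    have hfrom : PySem.Chars.findFrom l [','] ((p : Int) + 1)
        = if PySem.Chars.find (l.drop (p + 1)) [','] = -1 then -1
          else ((p : Int) + 1) + PySem.Chars.find (l.drop (p + 1)) [','] := by
      have := PySem.Chars.findFrom_natCast l [','] (p + 1) (by omega)
      push_cast at this ⊢
      simpa using this
    rw [hfind, hcp, hfrom]
    by_cases h2 : ',' ∈ l.drop (p + 1)
    · -- two commas: both sides slice at the second comma
      have hq : List.idxOf ',' (l.drop (p + 1)) < (l.drop (p + 1)).length :=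
        List.idxOf_lt_length_of_mem h2
      set q := List.idxOf ',' (l.drop (p + 1)) with hqdef
      have hdecomp2 : (l.drop (p + 1)).take q ++ ',' :: (l.drop (p + 1)).drop (q + 1)
          = l.drop (p + 1) := by
        have h' := List.take_append_drop q (l.drop (p + 1))
        rwa [List.drop_eq_getElem_cons hq, List.getElem_idxOf hq] at h'
      have hnotin2 : ',' ∉ (l.drop (p + 1)).take q := by
        intro hmem
        have := (List.mem_take_iff_idxOf_lt h2).1 hmem
        omega
      have hlen2 : ((l.drop (p + 1)).take q).length = q := by rw [List.length_take]; omega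
      have hcq : pvCommaPos (l.drop (p + 1))
          = (q : Int) :: (pvCommaPos ((l.drop (p + 1)).drop (q + 1))).map (· + ((q : Int) + 1)) := by
        conv_lhs => rw [← hdecomp2]
        rw [pvCommaPos_append _ _ hnotin2, hlen2]
      have hfind2 : PySem.Chars.find (l.drop (p + 1)) [','] = (q : Int) := by
        rw [pvFind_singleton, if_pos h2]
      rw [hfind2, hcq]
      rw [if_neg (show ¬(q : Int) = -1 by omega)]
      rw [if_neg (show ¬(p : Int) = -1 by omega)]
      rw [if_neg (show ¬(p : Int) + 1 + (q : Int) = -1 by omega)]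
      rw [if_pos (by simp; omega)]
      norm_num [PySem.List.pyGet?, PySem.List.pyIdx?]
      have harith : (q : Int) + ((p : Int) + 1) = (p : Int) + 1 + (q : Int) := by ring
      rw [harith]
    · -- exactly one comma: both sides are none
      have hnil2 : pvCommaPos (l.drop (p + 1)) = [] := (pvCommaPos_nil_iff _).2 h2
      have hfind2 : PySem.Chars.find (l.drop (p + 1)) [','] = -1 := by
        rw [pvFind_singleton, if_neg h2]
      rw [hnil2, hfind2]
      norm_num
  · -- no comma at all: both sides are none
    have hnil : pvCommaPos l = [] := (pvCommaPos_nil_iff l).2 h1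
    rw [hnil, pvFind_singleton, if_neg h1]
    simp

-- ============ reference form ============
def pvFirstMatch (s : List Char) : List (List Char) → Option (List Char × List (List Char))
  | [] => none
  | l :: ls => if PySem.Chars.isIn s l then some (l, ls) else pvFirstMatch s ls

def pvRef (cs s : List Char) : String :=
  match pvFirstMatch s (pvLinesOf cs) with
  | none => String.ofList cs
  | some (l, ls) =>
    match pvBeforeSecondComma l with
    | none => ""
    | some f => String.ofList (PySem.Chars.join ['\n'] (f :: ls))

theorem pvScan_spec (s : List Char) : ∀ (lines : List (List Char)) (i : Nat),
    (pvScanA s lines i = -1 ∧ pvFirstMatch s lines = none) ∨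
    (∃ (k : Nat) (l : List Char) (ls : List (List Char)), pvScanA s lines i = ((i + k : Nat) : Int) ∧
      pvFirstMatch s lines = some (l, ls) ∧ lines.drop k = l :: ls) := by
  intro lines
  induction lines with
  | nil => intro i; left; exact ⟨rfl, rfl⟩
  | cons x xs ih =>
    intro i
    by_cases hx : PySem.Chars.isIn s x
    · right
      exact ⟨0, x, xs, by simp [pvScanA, hx], by simp [pvFirstMatch, hx], by simp⟩
    · rcases ih (i + 1) with ⟨h1, h2⟩ | ⟨k, l, ls, h1, h2, h3⟩
      · left
        refine ⟨?_, ?_⟩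
        · simp [pvScanA, hx]; exact_mod_cast h1
        · simp [pvFirstMatch, hx, h2]
      · right
        refine ⟨k + 1, l, ls, ?_, ?_, ?_⟩
        · simp only [pvScanA, if_neg hx]
          push_cast at h1 ⊢
          rw [h1]; ring
        · simp [pvFirstMatch, hx, h2]
        · simpa using h3

theorem pvA_eq_ref (text str_to_find : String) :
    remove_all_redundant_lines_from_str text str_to_find
      = pvRef text.toList str_to_find.toList := by
  unfold remove_all_redundant_lines_from_str pvRef
  dsimp only
  rw [pvSplitOn_eq]
  rcases pvScan_spec str_to_find.toList (pvLinesOf text.toList) 0 with ⟨h1, h2⟩ | ⟨k, l, ls, h1, h2, h3⟩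
  · norm_num at h1
    rw [h1, h2]
    simp [pvJoin_linesOf]
  · norm_num at h1
    rw [h1, h2]
    rw [if_pos (by omega)]
    have hslice : PySem.List.slice (pvLinesOf text.toList) (some ((k : Nat) : Int)) none
        = l :: ls := by
      rw [PySem.List.slice_from_natCast]
      simpa using h3
    rw [hslice]
    dsimp only
    rw [pvHelper_eq]

-- ============ B loop equals the reference ============
theorem pvLoop_eq (cs s : List Char) (start : Nat) (h : start ≤ cs.length) :
    pvAltLoop cs s start =
      (match pvFirstMatch s (pvLinesOf (cs.drop start)) with
       | none => String.ofList cs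
       | some (l, ls) =>
         match pvBeforeSecondComma l with
         | none => ""
         | some f => String.ofList (PySem.Chars.join ['\n'] (f :: ls))) := by
  rw [pvAltLoop]
  have hfrom := PySem.Chars.findFrom_natCast cs ['\n'] start h
  by_cases hnl : PySem.Chars.find (cs.drop start) ['\n'] = -1
  · -- no newline after start: the suffix is the last line
    have hmem : '\n' ∉ cs.drop start := by
      intro hm
      rw [pvFind_singleton, if_pos hm] at hnl
      omega
    have hnl' : PySem.Chars.findFrom cs ['\n'] (start : Int) = -1 := by
      rw [hfrom, if_pos hnl]
    rw [hnl']
    norm_num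
    have hhead : PySem.List.slice cs (some (start : Int)) (some (cs.length : Int))
        = cs.drop start := by
      rw [PySem.List.slice_natCast, List.take_of_length_le (by simp)]
    rw [hhead]
    rw [pvLinesOf_no_nl hmem]
    by_cases hin : PySem.Chars.isIn s (cs.drop start)
    · rw [if_pos hin]
      simp only [pvFirstMatch, if_pos hin]
      rcases pvBeforeSecondComma (cs.drop start) with _ | t
      · rfl
      · simp [PySem.Chars.join_singleton]
    · rw [if_neg hin]
      simp only [pvFirstMatch, if_neg hin]
  · -- newline found at idxOf
    have hmem : '\n' ∈ cs.drop start := by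
      by_contra hm
      rw [pvFind_singleton, if_neg hm] at hnl
      exact hnl rfl
    set jn := List.idxOf '\n' (cs.drop start) with hjdef
    have hjlt : jn < (cs.drop start).length := List.idxOf_lt_length_of_mem hmem
    have hfindv : PySem.Chars.find (cs.drop start) ['\n'] = (jn : Int) := by
      rw [pvFind_singleton, if_pos hmem]
    have hnl' : PySem.Chars.findFrom cs ['\n'] (start : Int) = ((start + jn : Nat) : Int) := by
      rw [hfrom, if_neg hnl, hfindv]; push_cast; ring
    rw [hnl']
    have hne : ¬((start + jn : Nat) : Int) = -1 := by omega
    simp only [if_neg hne, dif_neg hne]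
    have hhead : PySem.Chars.slice cs (some (start : Int)) (some ((start + jn : Nat) : Int))
        = (cs.drop start).take jn := by
      simp only [PySem.Chars.slice_eq_listSlice]
      rw [show ((start + jn : Nat) : Int) = (start : Int) + (jn : Int) by push_cast; ring]
      exact PySem.List.slice_natCast_add cs start jn
    rw [hhead]
    have hdecomp : (cs.drop start).take jn ++ '\n' :: (cs.drop start).drop (jn + 1)
        = cs.drop start := by
      have h' := List.take_append_drop jn (cs.drop start)
      rwa [List.drop_eq_getElem_cons hjlt, List.getElem_idxOf hjlt] at h'
    have hnotin : '\n' ∉ (cs.drop start).take jn := by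
      intro hm
      have := (List.mem_take_iff_idxOf_lt hmem).1 hm
      omega
    have hlines : pvLinesOf (cs.drop start)
        = (cs.drop start).take jn :: pvLinesOf ((cs.drop start).drop (jn + 1)) := by
      conv_lhs => rw [← hdecomp]
      exact pvLinesOf_append _ hnotin
    rw [hlines]
    by_cases hin : PySem.Chars.isIn s ((cs.drop start).take jn)
    · rw [if_pos hin]
      simp only [pvFirstMatch, if_pos hin]
      rcases pvBeforeSecondComma ((cs.drop start).take jn) with _ | t
      · rfl
      · dsimp only
        have hrest : PySem.Chars.slice cs (some ((start + jn : Nat) : Int)) none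
            = '\n' :: (cs.drop start).drop (jn + 1) := by
          have h2' : List.drop jn (List.drop start cs)
              = '\n' :: List.drop (jn + 1) (List.drop start cs) := by
            rw [List.drop_eq_getElem_cons hjlt, List.getElem_idxOf hjlt]
          have h3' : List.drop (start + jn) cs = List.drop jn (List.drop start cs) := by
            rw [List.drop_drop]
          simp only [PySem.Chars.slice_eq_listSlice, PySem.List.slice_from_natCast]
          rw [h3', h2']
        rw [hrest]
        rcases hrl : pvLinesOf ((cs.drop start).drop (jn + 1)) with _ | ⟨x, xs⟩
        · exact absurd hrl (pvLinesOf_ne_nil _)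
        · rw [PySem.Chars.join_cons_cons]
          have hjoin := pvJoin_linesOf ((cs.drop start).drop (jn + 1))
          rw [hrl] at hjoin
          rw [hjoin]
          simp
    · rw [if_neg hin]
      simp only [pvFirstMatch, if_neg hin]
      have hrec := pvLoop_eq cs s (((start + jn : Nat) : Int).toNat + 1)
        (by simp; simp [List.length_drop] at hjlt; omega)
      rw [show (((start + jn : Nat) : Int).toNat + 1) = start + jn + 1 by omega] at hrec
      rw [show (((start + jn : Nat) : Int)).toNat + 1 = start + jn + 1 by omega]
      rw [hrec]
      rw [show cs.drop (start + jn + 1) = (cs.drop start).drop (jn + 1) by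
        rw [List.drop_drop, Nat.add_assoc]]
termination_by cs.length - start
decreasing_by
  simp only [List.length_drop] at hjlt
  omega

theorem pv_main (text str_to_find : String) :
    remove_all_redundant_lines_from_str text str_to_find
      = remove_all_redundant_lines_from_str_alt text str_to_find := by
  rw [pvA_eq_ref]
  unfold remove_all_redundant_lines_from_str_alt
  rw [pvLoop_eq text.toList str_to_find.toList 0 (Nat.zero_le _), List.drop_zero]
  rfl

-- ===== VERDICT (by name: the statement is the Claim_ definition above) =====
theorem remove_all_redundant_lines_from_str_spec : Claim_equal_remove_all_redundant_lines_from_str := by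
  intro text s _ _
  exact pv_main text s
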